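-- pv_equiv track=rewrite | github.com/volcengine/verl | atropos/environments/intern_bootcamp/internbootcamp_lib/internbootcamp/bootcamp/aryoukosmemorynote/aryoukosmemorynote.py | calculate_min_pages
-- ===== SOURCE A (Python) =====
-- def calculate_min_pages(n, m, a):
--     if m < 2:
--         return 0
--     v = [[] for _ in range(n + 1)]
--     ans = 0
--     for i in range(1, m):
--         prev = a[i-1]
--         curr = a[i]
--         if prev != curr:
--             v[prev].append(curr)
--             v[curr].append(prev)
--             ans += abs(curr - prev)
--     max_change = 0
--     for i in range(1, n + 1):
--         neighbors = v[i]
--         if not neighbors: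
--             continue
--         sorted_nb = sorted(neighbors)
--         suma = sum(abs(x - i) for x in sorted_nb)
--         sumb = 0
--         left = 0
--         right = len(sorted_nb) - 1
--         while left < right:
--             sumb += sorted_nb[right] - sorted_nb[left]
--             left += 1
--             right -= 1
--         current_change = suma - sumb
--         if current_change > max_change:
--             max_change = current_change
--     return ans - max_change
-- ===== SOURCE B (Python) =====
-- def calculate_min_pages(n, m, a):
--     if m < 2:
--         return 0
--     v = [[] for _ in range(n + 1)]
--     ans = 0
--     for prev, curr in zip(a, a[1:m]):
--         if prev != curr:
--             v[prev].append(curr)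
--             v[curr].append(prev)
--             ans += abs(curr - prev)
--     best = 0
--     for i, nb in enumerate(v):
--         if i == 0 or not nb:
--             continue
--         # no sorting: the optimal relabel target is attained at some neighbour value,
--         # so minimize the deviation sum over the candidates in nb directly
--         cost_now = sum(abs(x - i) for x in nb)
--         cost_best = min(sum(abs(x - t) for x in nb) for t in nb)
--         if cost_now - cost_best > best:
--             best = cost_now - cost_best
--     return ans - best
-- ===== Notes on version B (the rewrite author's own statement) =====
-- stated objective: alternative
-- what changed: B drops A's sort and two-pointer pairing entirely: for each vertex it brute-force minimizes the deviation sum over every neighbour value as candidate target (correct because sum of |x-t| is convex piecewise-linear and attains its minimum at a data point), and it streams the consecutive pairs with zip and the adjacency array with enumerate.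
import Mathlib
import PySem

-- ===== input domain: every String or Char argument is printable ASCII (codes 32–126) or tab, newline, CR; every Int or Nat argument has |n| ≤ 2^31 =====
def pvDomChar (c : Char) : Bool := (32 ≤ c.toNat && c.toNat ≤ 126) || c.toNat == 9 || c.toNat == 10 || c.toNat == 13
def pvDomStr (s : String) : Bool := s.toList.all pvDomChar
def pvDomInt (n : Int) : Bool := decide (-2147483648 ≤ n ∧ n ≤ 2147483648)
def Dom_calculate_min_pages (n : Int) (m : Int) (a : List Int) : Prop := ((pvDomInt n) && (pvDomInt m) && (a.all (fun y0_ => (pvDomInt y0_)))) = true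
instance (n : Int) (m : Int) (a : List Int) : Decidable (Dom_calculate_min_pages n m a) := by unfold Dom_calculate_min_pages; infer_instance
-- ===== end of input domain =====

-- B removes A's per-vertex sort and two-pointer pairing: it minimizes the deviation sum
-- directly over every neighbour value as a candidate relabel target (the optimum of the
-- convex piecewise-linear Σ|x−t| is attained at a data point), streaming the consecutive
-- pairs with zip and the adjacency array with enumerate; objective: alternative algorithm.

-- ===== PORT A =====
-- v[idx].append(x) on a list of lists, Python index semantics (negative wraps; out of
-- range raises there, here: unchanged — such inputs are outside Pre_).
def pvAppendAt (v : List (List Int)) (idx : Int) (x : Int) : List (List Int) :=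
  match PySem.List.pyGet? v idx with
  | some ys => PySem.List.pySetD v idx (ys ++ [x])
  | none => v

-- body of A's first loop: prev = a[i-1], curr = a[i] (in range inside Pre_)
def pvStepA1 (a : List Int) (st : List (List Int) × Int) (i : Int) : List (List Int) × Int :=
  let prev := PySem.List.pyGetD a (i - 1) 0
  let curr := PySem.List.pyGetD a i 0
  if prev ≠ curr then
    (pvAppendAt (pvAppendAt st.1 prev curr) curr prev, st.2 + |curr - prev|)
  else st

-- A's two-pointer while loop (indices are always in range when reached); the fuel
-- right - left is the loop's own termination measure and only drives the recursion.
def pvPairLoopAux (s : List Int) : Nat → Int → Nat → Nat → Int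
  | 0, sumb, _, _ => sumb
  | fuel + 1, sumb, left, right =>
    if left < right then
      pvPairLoopAux s fuel (sumb + (s.getD right 0 - s.getD left 0)) (left + 1) (right - 1)
    else sumb

def pvPairLoop (s : List Int) (sumb : Int) (left right : Nat) : Int :=
  pvPairLoopAux s (right - left) sumb left right

-- body of A's second loop
def pvStepA2 (v : List (List Int)) (mc : Int) (i : Int) : Int :=
  let neighbors := PySem.List.pyGetD v i []
  if neighbors = [] then mc
  else
    let sorted_nb := PySem.List.sorted neighbors (fun x => x) false
    let suma := (sorted_nb.map (fun x => |x - i|)).sum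
    let sumb := pvPairLoop sorted_nb 0 0 (sorted_nb.length - 1)
    let current_change := suma - sumb
    if current_change > mc then current_change else mc

def calculate_min_pages (n : Int) (m : Int) (a : List Int) : Int :=
  if m < 2 then 0
  else
    let v0 : List (List Int) := List.replicate (n + 1).toNat []
    let st := (PySem.List.pyRange 1 m 1).foldl (pvStepA1 a) (v0, 0)
    let max_change := (PySem.List.pyRange 1 (n + 1) 1).foldl (pvStepA2 st.1) 0
    st.2 - max_change

-- ===== PORT B =====
-- body of B's first loop, over pairs from zip(a, a[1:m])
def pvStepB1 (st : List (List Int) × Int) (pc : Int × Int) : List (List Int) × Int :=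
  if pc.1 ≠ pc.2 then
    (pvAppendAt (pvAppendAt st.1 pc.1 pc.2) pc.2 pc.1, st.2 + |pc.2 - pc.1|)
  else st

-- body of B's second loop, over enumerate(v): brute-force candidate minimization,
-- min(gen) = PySem.List.min? (nb is nonempty on this branch, so min? is some)
def pvStepB2 (best : Int) (pr : Int × List Int) : Int :=
  if pr.1 = 0 ∨ pr.2 = [] then best
  else
    let nb := pr.2
    let cost_now := (nb.map (fun x => |x - pr.1|)).sum
    let cost_best :=
      (PySem.List.min? (nb.map (fun t => (nb.map (fun x => |x - t|)).sum)) (fun c => c)).getD 0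
    if cost_now - cost_best > best then cost_now - cost_best else best

def calculate_min_pages_alt (n : Int) (m : Int) (a : List Int) : Int :=
  if m < 2 then 0
  else
    let v0 : List (List Int) := List.replicate (n + 1).toNat []
    let st := (a.zip (PySem.List.slice a (some 1) (some m))).foldl pvStepB1 (v0, 0)
    let best := (PySem.List.enumerate st.1).foldl pvStepB2 0
    st.2 - best

-- ===== PRECONDITION & SPEC =====
-- Pre_ is exactly where Python A returns normally: either m < 2 (early return), or the
-- list is long enough (else a[i] raises IndexError) and every DISTINCT consecutive pair
-- among the first m values lies in [-(n+1), n], the indices v[x] accepts (else v[x]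
-- raises IndexError).
def Pre_calculate_min_pages (n : Int) (m : Int) (a : List Int) : Prop :=
  m < 2 ∨ (m ≤ (a.length : Int) ∧
    ∀ p ∈ (a.take m.toNat).zip ((a.take m.toNat).tail),
      p.1 ≠ p.2 → (-(n + 1) ≤ p.1 ∧ p.1 ≤ n ∧ -(n + 1) ≤ p.2 ∧ p.2 ≤ n))
instance (n : Int) (m : Int) (a : List Int) : Decidable (Pre_calculate_min_pages n m a) := by
  unfold Pre_calculate_min_pages; infer_instance

def pvWitness_calculate_min_pages : Int × Int × List Int := (3, 4, [1, 3, 2, 3])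

def Spec_calculate_min_pages (n : Int) (m : Int) (a : List Int) (out : Int) : Prop := out = calculate_min_pages_alt n m a
instance (n : Int) (m : Int) (a : List Int) (out : Int) : Decidable (Spec_calculate_min_pages n m a out) := by unfold Spec_calculate_min_pages; infer_instance

-- ===== CLAIM (what is proved, stated in full; the proofs are below) =====
def Claim_equal_calculate_min_pages : Prop := ∀ (n : Int) (m : Int) (a : List Int), Dom_calculate_min_pages n m a → Pre_calculate_min_pages n m a → Spec_calculate_min_pages n m a (calculate_min_pages n m a)

-- ===== LEMMAS AND PROOFS =====

-- partial sum of entries of s with indices in [i, j)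
def pvS (s : List Int) (i j : Nat) : Int := ∑ x ∈ Finset.Ico i j, s.getD x 0

-- closed form of A's two-pointer loop: it adds the top (r-l+1)/2 entries of the
-- window [l, r] and subtracts the bottom (r-l+1)/2 entries
theorem pvPairLoopAux_eq (s : List Int) (fuel : Nat) : ∀ (l r : Nat) (c : Int),
    r - l ≤ fuel →
    pvPairLoopAux s fuel c l r
      = c + pvS s (r + 1 - (r - l + 1) / 2) (r + 1) - pvS s l (l + (r - l + 1) / 2) := by
  induction fuel with
  | zero =>
    intro l r c h
    have hrl : r - l = 0 := by omega
    simp [pvPairLoopAux, hrl, pvS]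
  | succ fuel ih =>
    intro l r c h
    by_cases hlr : l < r
    · have hrec := ih (l + 1) (r - 1) (c + (s.getD r 0 - s.getD l 0)) (by omega)
      have hstep : pvPairLoopAux s (fuel + 1) c l r
          = pvPairLoopAux s fuel (c + (s.getD r 0 - s.getD l 0)) (l + 1) (r - 1) := by
        simp [pvPairLoopAux, hlr]
      rw [hstep, hrec]
      have ht : (r - l + 1) / 2 = (r - l - 1) / 2 + 1 := by omega
      have ht' : (r - 1 - (l + 1) + 1) / 2 = (r - l - 1) / 2 := by omega
      set t' : Nat := (r - l - 1) / 2 with htdef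
      have e1 : r - 1 + 1 = r := by omega
      have e2 : r + 1 - (t' + 1) = r - t' := by omega
      have e3 : l + (t' + 1) = l + 1 + t' := by omega
      rw [ht', ht, e2, e3, e1]
      have h4 : pvS s (r - t') (r + 1) = pvS s (r - t') r + s.getD r 0 := by
        have : r - t' ≤ r := by omega
        simpa [pvS] using Finset.sum_Ico_succ_top this (fun x => s.getD x 0)
      have h5 : pvS s l (l + 1 + t') = s.getD l 0 + pvS s (l + 1) (l + 1 + t') := by
        have : l < l + 1 + t' := by omega
        simpa [pvS] using Finset.sum_eq_sum_Ico_succ_bot this (fun x => s.getD x 0)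
      rw [h4, h5]; ring
    · have hrl : r - l = 0 := by omega
      simp [pvPairLoopAux, hlr, hrl, pvS]

-- a mapped list sum as a sum over indices
theorem pvSum_map (f : Int → Int) (s : List Int) :
    (s.map f).sum = ∑ i ∈ Finset.range s.length, f (s.getD i 0) := by
  induction s with
  | nil => simp
  | cons x t ih =>
    simp [ih, Finset.sum_range_succ']
    ring

-- sum of |x - median| over a sorted list = top half minus bottom half
theorem pvMedSum (s : List Int) (hs : ∀ (p q : Nat), p ≤ q → (hq : q < s.length) →
      s.getD p 0 ≤ s.getD q 0) (hne : s ≠ []) :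
    (s.map (fun x => |x - s.getD (s.length / 2) 0|)).sum
      = pvS s (s.length - s.length / 2) s.length - pvS s 0 (s.length / 2) := by
  have hL : 0 < s.length := List.length_pos_iff.mpr hne
  set L := s.length with hLdef
  set k := L / 2 with hkdef
  set med := s.getD k 0 with hmeddef
  rw [pvSum_map]
  rw [Finset.range_eq_Ico, ← Finset.sum_Ico_consecutive _ (Nat.zero_le k) (by omega : k ≤ L)]
  have hlow : ∑ i ∈ Finset.Ico 0 k, |s.getD i 0 - med| = ∑ i ∈ Finset.Ico 0 k, (med - s.getD i 0) := by
    refine Finset.sum_congr rfl (fun i hi => ?_)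
    have hik : i < k := (Finset.mem_Ico.mp hi).2
    have hle : s.getD i 0 ≤ med := hs i k (by omega) (by omega)
    rw [abs_of_nonpos (by omega), neg_sub]
  have hhigh : ∑ i ∈ Finset.Ico k L, |s.getD i 0 - med| = ∑ i ∈ Finset.Ico k L, (s.getD i 0 - med) := by
    refine Finset.sum_congr rfl (fun i hi => ?_)
    have hik : k ≤ i ∧ i < L := Finset.mem_Ico.mp hi
    have hle : med ≤ s.getD i 0 := hs k i hik.1 hik.2
    exact abs_of_nonneg (by omega)
  rw [hlow, hhigh, Finset.sum_sub_distrib, Finset.sum_sub_distrib,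
    Finset.sum_const, Finset.sum_const, Nat.card_Ico, Nat.card_Ico, nsmul_eq_mul, nsmul_eq_mul]
  have hsplit : pvS s k (L - k) + pvS s (L - k) L = pvS s k L := by
    simpa [pvS] using Finset.sum_Ico_consecutive (fun x => s.getD x 0)
      (by omega : k ≤ L - k) (by omega : L - k ≤ L)
  have hmid : pvS s k (L - k) = (((L - k : Nat) : Int) - (k : Int)) * med := by
    have hcase : L - k = k ∨ L - k = k + 1 := by omega
    rcases hcase with h1 | h1
    · rw [h1]; simp [pvS]
    · rw [h1]
      have : pvS s k (k + 1) = s.getD k 0 := by simp [pvS, Nat.Ico_succ_singleton]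
      rw [this]
      have : ((k + 1 : Nat) : Int) - (k : Int) = 1 := by push_cast; ring
      rw [this, one_mul, hmeddef]
  have hkL : k ≤ L - k := by omega
  simp only [pvS, ← Finset.range_eq_Ico, Nat.sub_zero, List.getD_eq_getElem?_getD]
    at hsplit hmid ⊢
  push_cast [Nat.cast_sub (by omega : k ≤ L)] at hsplit hmid ⊢
  linarith

-- any target t has deviation sum at least top half minus bottom half (sorted list)
theorem pvDevLower (s : List Int) (hs : ∀ (p q : Nat), p ≤ q → (hq : q < s.length) →
      s.getD p 0 ≤ s.getD q 0) (t : Int) :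
    pvS s (s.length - s.length / 2) s.length - pvS s 0 (s.length / 2)
      ≤ (s.map (fun x => |x - t|)).sum := by
  set L := s.length with hLdef
  set k := L / 2 with hkdef
  rw [pvSum_map]
  rw [Finset.range_eq_Ico, ← Finset.sum_Ico_consecutive _ (Nat.zero_le k) (by omega : k ≤ L),
    ← Finset.sum_Ico_consecutive (fun i => |s.getD i 0 - t|) (by omega : k ≤ L - k)
      (by omega : L - k ≤ L)]
  have hmid : 0 ≤ ∑ i ∈ Finset.Ico k (L - k), |s.getD i 0 - t| :=
    Finset.sum_nonneg (fun i _ => abs_nonneg _)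
  have hlowshift : ∑ i ∈ Finset.Ico 0 k, |s.getD i 0 - t|
      = ∑ j ∈ Finset.range k, |s.getD j 0 - t| := by
    rw [← Finset.range_eq_Ico]
  have hhighshift : ∑ i ∈ Finset.Ico (L - k) L, |s.getD i 0 - t|
      = ∑ j ∈ Finset.range k, |s.getD (L - k + j) 0 - t| := by
    rw [Finset.sum_Ico_eq_sum_range]
    have : L - (L - k) = k := by omega
    rw [this]
  have hlowS : pvS s 0 k = ∑ j ∈ Finset.range k, s.getD j 0 := by
    simp only [pvS]
    rw [Finset.range_eq_Ico]
  have hhighS : pvS s (L - k) L = ∑ j ∈ Finset.range k, s.getD (L - k + j) 0 := by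
    rw [pvS, Finset.sum_Ico_eq_sum_range]
    have : L - (L - k) = k := by omega
    rw [this]
  have hpair : ∑ j ∈ Finset.range k, (s.getD (L - k + j) 0 - s.getD j 0)
      ≤ ∑ j ∈ Finset.range k, (|s.getD j 0 - t| + |s.getD (L - k + j) 0 - t|) := by
    refine Finset.sum_le_sum (fun j hj => ?_)
    have hjk : j < k := Finset.mem_range.mp hj
    have hle : s.getD j 0 ≤ s.getD (L - k + j) 0 := hs j (L - k + j) (by omega) (by omega)
    have h1 : |s.getD j 0 - t| ≥ t - s.getD j 0 := by
      have := abs_nonneg (s.getD j 0 - t); have := le_abs_self (t - s.getD j 0)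
      rw [← abs_sub_comm] at this; omega
    have h2 : |s.getD (L - k + j) 0 - t| ≥ s.getD (L - k + j) 0 - t :=
      le_abs_self _
    omega
  rw [Finset.sum_sub_distrib] at hpair
  rw [Finset.sum_add_distrib] at hpair
  rw [hlowshift, hhighshift, hlowS, hhighS]
  linarith

-- pointwise sum over a permuted list is unchanged
theorem pvSum_map_perm (f : Int → Int) {s t : List Int} (h : s.Perm t) :
    (s.map f).sum = (t.map f).sum :=
  (h.map f).sum_eq

-- monotone entries of a PySem-sorted Int list, in getD form
theorem pvSorted_getD_mono (nb : List Int) (p q : Nat) (hpq : p ≤ q)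
    (hq : q < (PySem.List.sorted nb (fun x => x) false).length) :
    (PySem.List.sorted nb (fun x => x) false).getD p 0
      ≤ (PySem.List.sorted nb (fun x => x) false).getD q 0 := by
  rw [List.getD_eq_getElem _ _ (by omega), List.getD_eq_getElem _ _ hq]
  exact PySem.List.sorted_id_getElem_mono nb hpq hq

-- the two per-vertex bodies agree for indices i ≥ 1
theorem pvStep2_eq (v : List (List Int)) (mc : Int) (i : Int) (hi : 1 ≤ i) :
    pvStepA2 v mc i = pvStepB2 mc (i, PySem.List.pyGetD v i []) := by
  unfold pvStepA2 pvStepB2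
  by_cases hnb : PySem.List.pyGetD v i [] = []
  · simp [hnb]
  · have hi0 : ¬(i = 0) := by omega
    simp only [hnb, hi0, or_self, ite_false]
    set nb := PySem.List.pyGetD v i [] with hnbdef
    set s := PySem.List.sorted nb (fun x => x) false with hsdef
    have hperm : nb.Perm s := (PySem.List.sorted_perm nb (fun x => x) false).symm
    have hsne : s ≠ [] := by
      intro h; rw [h] at hperm; exact hnb hperm.eq_nil
    have hL : 0 < s.length := List.length_pos_iff.mpr hsne
    set med := s.getD (s.length / 2) 0 with hmeddef
    have hmedval : (s.map (fun x => |x - med|)).sum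
        = pvS s (s.length - s.length / 2) s.length - pvS s 0 (s.length / 2) :=
      pvMedSum s (fun p q hpq hq => pvSorted_getD_mono nb p q hpq hq) hsne
    -- A's two-pointer sumb equals the deviation sum at the median
    have hpair : pvPairLoop s 0 0 (s.length - 1) = (s.map (fun x => |x - med|)).sum := by
      unfold pvPairLoop
      rw [pvPairLoopAux_eq s (s.length - 1 - 0) 0 (s.length - 1) 0 (le_refl _)]
      rw [hmedval]
      have e1 : s.length - 1 + 1 = s.length := by omega
      have e2 : (s.length - 1 - 0 + 1) / 2 = s.length / 2 := by omega
      rw [e1, e2]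
      ring_nf
    -- B's min over candidates equals the deviation sum at the median
    have hmedmem : med ∈ nb := by
      refine hperm.symm.mem_iff.mp ?_
      rw [hmeddef, List.getD_eq_getElem _ _ (by omega : s.length / 2 < s.length)]
      exact List.getElem_mem _
    have hlb : ∀ t ∈ nb, (s.map (fun x => |x - med|)).sum ≤ (nb.map (fun x => |x - t|)).sum := by
      intro t _
      rw [pvSum_map_perm (fun x => |x - t|) hperm, hmedval]
      exact pvDevLower s (fun p q hpq hq => pvSorted_getD_mono nb p q hpq hq) t
    set costs := nb.map (fun t => (nb.map (fun x => |x - t|)).sum) with hcostsdef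
    have hcostsne : costs ≠ [] := by
      simp [hcostsdef]; exact hnb
    obtain ⟨mval, hmval⟩ : ∃ mval, PySem.List.min? costs (fun c => c) = some mval := by
      cases hmc : PySem.List.min? costs (fun c => c) with
      | none => exact absurd ((PySem.List.min?_eq_none_iff costs (fun c => c)).mp hmc) hcostsne
      | some mval => exact ⟨mval, rfl⟩
    have hmmem : mval ∈ costs := PySem.List.min?_mem hmval
    have hmin : ∀ y ∈ costs, mval ≤ y := PySem.List.min?_isMin hmval
    have hmedcost : (s.map (fun x => |x - med|)).sum ∈ costs := by
      rw [hcostsdef]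
      have : (s.map (fun x => |x - med|)).sum = (nb.map (fun x => |x - med|)).sum :=
        (pvSum_map_perm (fun x => |x - med|) hperm).symm
      rw [this]
      exact List.mem_map.mpr ⟨med, hmedmem, rfl⟩
    have hmeq : mval = (s.map (fun x => |x - med|)).sum := by
      have h1 : mval ≤ (s.map (fun x => |x - med|)).sum := hmin _ hmedcost
      obtain ⟨t, htmem, hteq⟩ := List.mem_map.mp hmmem
      have h2 : (s.map (fun x => |x - med|)).sum ≤ mval := by
        rw [← hteq]; exact hlb t htmem
      omega
    rw [hpair, hmval]
    simp only [Option.getD_some, hmeq]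
    have hsuma : (s.map (fun x => |x - i|)).sum = (nb.map (fun x => |x - i|)).sum :=
      (pvSum_map_perm (fun x => |x - i|) hperm).symm
    rw [hsuma]

-- A's first-loop body is B's body applied to the corresponding pair
theorem pvStep1_eq (a : List Int) (st : List (List Int) × Int) (i : Int) :
    pvStepA1 a st i = pvStepB1 st (PySem.List.pyGetD a (i - 1) 0, PySem.List.pyGetD a i 0) := rfl

-- the index range 1..m-1 read through a yields exactly zip(a, a[1:m])
theorem pvPairs_eq (a : List Int) (m : Int) (h2 : 2 ≤ m) (hm : m ≤ (a.length : Int)) :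
    (PySem.List.pyRange 1 m 1).map
        (fun i => (PySem.List.pyGetD a (i - 1) 0, PySem.List.pyGetD a i 0))
      = a.zip (PySem.List.slice a (some 1) (some m)) := by
  rw [PySem.List.slice_toNat a (by omega : (0:Int) ≤ 1) (by omega : 0 ≤ m)]
  apply List.ext_getElem
  · simp [PySem.List.length_pyRange_one]
    omega
  · intro k h1 h2'
    have hk : (k : Int) < m - 1 := by
      have := h1; simp [PySem.List.length_pyRange_one] at this; omega
    have hk1 : k + 1 < a.length := by omega
    have hk0 : k < a.length := by omega
    simp only [List.getElem_map, PySem.List.getElem_pyRange_one, List.getElem_zip,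
      List.getElem_take, List.getElem_drop]
    have e1 : (1 : Int) + (k : Int) - 1 = ((k : Nat) : Int) := by omega
    have e2 : (1 : Int) + (k : Int) = (((k + 1 : Nat)) : Int) := by omega
    rw [e1, e2, PySem.List.pyGetD_natCast, PySem.List.pyGetD_natCast,
      List.getD_eq_getElem _ _ hk0, List.getD_eq_getElem _ _ hk1]
    simp [Nat.add_comm 1 k]

-- the first loops compute the same state
theorem pvLoop1_eq (a : List Int) (m : Int) (h2 : 2 ≤ m) (hm : m ≤ (a.length : Int))
    (init : List (List Int) × Int) :
    (PySem.List.pyRange 1 m 1).foldl (pvStepA1 a) init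
      = (a.zip (PySem.List.slice a (some 1) (some m))).foldl pvStepB1 init := by
  rw [← pvPairs_eq a m h2 hm, List.foldl_map]
  exact PySem.List.foldl_congr_mem _ _ _ _ (fun acc x _ => pvStep1_eq a acc x)

-- pvAppendAt never changes the outer length
theorem pvAppendAt_length (v : List (List Int)) (idx : Int) (x : Int) :
    (pvAppendAt v idx x).length = v.length := by
  unfold pvAppendAt
  cases PySem.List.pyGet? v idx with
  | none => rfl
  | some ys => simp [PySem.List.length_pySetD]

-- B's first loop preserves the adjacency-array length
theorem pvLoop1_length (ps : List (Int × Int)) : ∀ (st : List (List Int) × Int),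
    ((ps.foldl pvStepB1 st).1).length = st.1.length := by
  induction ps with
  | nil => intro st; rfl
  | cons p t ih =>
    intro st
    rw [List.foldl_cons, ih]
    unfold pvStepB1
    split
    · simp [pvAppendAt_length]
    · rfl

-- the second loops agree on any adjacency array of length (n+1).toNat
theorem pvLoop2_eq (v : List (List Int)) (n : Int) (hv : v.length = (n + 1).toNat) :
    (PySem.List.pyRange 1 (n + 1) 1).foldl (pvStepA2 v) 0
      = (PySem.List.enumerate v).foldl pvStepB2 0 := by
  rw [PySem.List.enumerate_eq_map_pyRange v ([] : List Int), List.foldl_map]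
  by_cases hn : (0 : Int) < n + 1
  · have hlen : PySem.List.len v = n + 1 := by
      simp [PySem.List.len_eq, hv]; omega
    rw [hlen, PySem.List.pyRange_one_cons hn, List.foldl_cons]
    have h0 : pvStepB2 0 ((0 : Int), PySem.List.pyGetD v 0 []) = 0 := by
      simp [pvStepB2]
    rw [h0]
    have hz : (0 : Int) + 1 = 1 := by ring
    rw [hz]
    exact PySem.List.foldl_congr_mem _ _ _ _ (fun acc x hx => by
      have hx1 : 1 ≤ x := (PySem.List.mem_pyRange_one.mp hx).1
      exact pvStep2_eq v acc x hx1)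
  · have hv0 : v.length = 0 := by omega
    have hlen : PySem.List.len v = 0 := by simp [PySem.List.len_eq, hv0]
    rw [hlen, PySem.List.pyRange_one_eq_nil (by omega : n + 1 ≤ 1),
      PySem.List.pyRange_one_eq_nil (by omega : (0:Int) ≤ 0)]
    rfl

-- ===== VERDICT (by name: the statement is the Claim_ definition above) =====
theorem calculate_min_pages_spec : Claim_equal_calculate_min_pages := by
  intro n m a _hdom hpre
  unfold Spec_calculate_min_pages calculate_min_pages calculate_min_pages_alt
  by_cases hm : m < 2
  · simp [hm]
  · simp only [if_neg hm]
    have h2 : (2 : Int) ≤ m := by omega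
    have hlen : m ≤ (a.length : Int) := by
      rcases hpre with h | ⟨h, _⟩
      · omega
      · exact h
    rw [pvLoop1_eq a m h2 hlen]
    set st := (a.zip (PySem.List.slice a (some 1) (some m))).foldl pvStepB1
      (List.replicate (n + 1).toNat ([] : List Int), 0) with hstdef
    have hstlen : st.1.length = (n + 1).toNat := by
      rw [hstdef, pvLoop1_length]
      simp
    rw [pvLoop2_eq st.1 n hstlen]
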